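-- pv_equiv track=rewrite | github.com/juandarr/ProjectEuler | 109.py | darts_checkout
-- ===== SOURCE A (Python) =====
-- def checkout_solutions(checkout,sequence,idx_sq,d):
--     '''
--     returns the number of solution for a given checkout value
--     '''
--     counter = 0
--     for double in d:
--         if double>checkout:
--             break
--         res = checkout-double
--
--         if res==0:
--             counter +=1
--             continue
--         if res<=60:
--             if res in idx_sq:
--                 index = idx_sq[res]
--             else:
--                 index = len(sequence)-1
--                 while res>sequence[index]:
--                     index -=1
--         else:
--             index = len(sequence)-1
--
--         for idx in range(index,-1,-1):
--             a = sequence[idx]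
--             if a==res:
--                 counter+=1
--                 continue
--             for idx2 in range(idx,-1,-1):
--                 if a+sequence[idx2]==res:
--                     counter +=1
--                 elif a+sequence[idx2]<res:
--                     break
--     return counter
--
-- def darts_checkout(limit_value):
--     s = [i for i in range(1,21)]+[25]
--     d = [2*i for i in range(1,21)]+[50]
--     t = [3*i for i in range(1,21)]
--     sequence = sorted(s+d+t)
--     idx_sq = {}
--     for idx in range(len(sequence)-1):
--         if sequence[idx]!=sequence[idx+1]:
--             idx_sq[sequence[idx]]=idx
--     idx_sq[sequence[-1]]=len(sequence)-1
--     n = limit_value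
--     total  = 0
--     for checkout in range(1,limit_value+1):
--         total += checkout_solutions(checkout,sequence,idx_sq,d)
--     return total
-- ===== SOURCE B (Python) =====
-- def darts_checkout(limit_value):
--     seq = sorted([i for i in range(1, 21)] + [25]
--                  + [2 * i for i in range(1, 21)] + [50]
--                  + [3 * i for i in range(1, 21)])
--     doubles = [2 * i for i in range(1, 21)] + [50]
--     total = 0
--     for dd in doubles:
--         if dd <= limit_value:
--             total += 1
--         for i in range(len(seq)):
--             a = dd + seq[i]
--             if a <= limit_value:
--                 total += 1
--             for j in range(i + 1):
--                 if a + seq[j] <= limit_value: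
--                     total += 1
--     return total
-- ===== Notes on version B (the rewrite author's own statement) =====
-- stated objective: faster
-- what changed: Instead of looping over every checkout value up to the limit and re-counting exact-sum solutions per checkout (with an index dictionary and break-based inner scans), B enumerates each double+one/two-dart combination exactly once and counts those whose total is at most the limit.
import Mathlib
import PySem

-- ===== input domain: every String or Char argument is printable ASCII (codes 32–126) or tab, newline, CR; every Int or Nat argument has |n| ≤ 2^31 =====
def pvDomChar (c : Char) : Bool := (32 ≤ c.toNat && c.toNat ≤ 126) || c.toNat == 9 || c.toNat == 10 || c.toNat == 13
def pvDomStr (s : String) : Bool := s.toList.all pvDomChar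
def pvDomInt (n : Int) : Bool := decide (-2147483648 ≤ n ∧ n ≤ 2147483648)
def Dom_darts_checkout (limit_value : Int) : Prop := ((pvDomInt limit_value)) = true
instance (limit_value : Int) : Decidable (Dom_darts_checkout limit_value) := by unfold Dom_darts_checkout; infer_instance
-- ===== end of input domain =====

-- B replaces A's per-checkout scan (O(limit·D·S²)) by one enumeration of every
-- double+throws combination, counting those with total ≤ limit (O(D·S²)).

-- ===== PORT A =====
-- helpers of darts_checkout, hoisted: s, d, t, sequence and idx_sq are built once per call in Python
def dcA_seq : List Int :=
  PySem.List.sorted ((PySem.List.pyRange 1 21 1 ++ [25]) ++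
    ((PySem.List.pyRange 1 21 1).map (fun i => 2*i) ++ [50]) ++
    (PySem.List.pyRange 1 21 1).map (fun i => 3*i)) (fun x => x) false
def dcA_d : List Int := (PySem.List.pyRange 1 21 1).map (fun i => 2*i) ++ [50]
def dcA_dict : PySem.Dict Int Int :=
  ((PySem.List.pyRange 0 ((dcA_seq.length : Int) - 1) 1).foldl
    (fun dct idx =>
      if PySem.List.pyGetD dcA_seq idx 0 ≠ PySem.List.pyGetD dcA_seq (idx+1) 0
      then dct.insert (PySem.List.pyGetD dcA_seq idx 0) idx else dct)
    PySem.Dict.empty).insert (PySem.List.pyGetD dcA_seq (-1) 0) ((dcA_seq.length : Int) - 1)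

-- the 'while res>sequence[index]: index -= 1' loop, structural on the Nat index.
-- At index 0 Python would step to index -1 (never reached on any execution A performs:
-- the loop only starts with res ≤ 60 = sequence[-1], so it exits immediately).
def dcA_while (res : Int) (seq : List Int) : Nat → Int
  | 0 => if res > PySem.List.pyGetD seq 0 0 then -1 else 0
  | Nat.succ i => if res > PySem.List.pyGetD seq (Nat.succ i : Int) 0 then dcA_while res seq i
                  else (Nat.succ i : Int)

-- 'for idx2 in range(idx,-1,-1)' with break; indices stay in range, so pyGetD _ _ 0 is exact
def dcA_pair (res a : Int) (seq : List Int) : List Int → Int → Int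
  | [], c => c
  | j :: rest, c =>
    if a + PySem.List.pyGetD seq j 0 = res then dcA_pair res a seq rest (c+1)
    else if a + PySem.List.pyGetD seq j 0 < res then c
    else dcA_pair res a seq rest c

-- 'for idx in range(index,-1,-1)'
def dcA_idx (res : Int) (seq : List Int) : List Int → Int → Int
  | [], c => c
  | i :: rest, c =>
    if PySem.List.pyGetD seq i 0 = res then dcA_idx res seq rest (c+1)
    else dcA_idx res seq rest
      (dcA_pair res (PySem.List.pyGetD seq i 0) seq (PySem.List.pyRange i (-1) (-1)) c)

-- 'for double in d' with break
def dcA_doubles (checkout : Int) (seq : List Int) (dict : PySem.Dict Int Int) : List Int → Int → Int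
  | [], counter => counter
  | double :: rest, counter =>
    if double > checkout then counter
    else
      let res := checkout - double
      if res = 0 then dcA_doubles checkout seq dict rest (counter + 1)
      else
        let index : Int :=
          if res ≤ 60 then
            match dict.get? res with
            | some i => i
            | none => dcA_while res seq (seq.length - 1)
          else (seq.length : Int) - 1
        dcA_doubles checkout seq dict rest
          (dcA_idx res seq (PySem.List.pyRange index (-1) (-1)) counter)

def checkout_solutions (checkout : Int) (seq : List Int) (dict : PySem.Dict Int Int) (d : List Int) : Int :=
  dcA_doubles checkout seq dict d 0

def darts_checkout (limit_value : Int) : Int :=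
  (PySem.List.pyRange 1 (limit_value + 1) 1).foldl
    (fun total checkout => total + checkout_solutions checkout dcA_seq dcA_dict dcA_d) 0

-- ===== PORT B =====
def dcB_seq : List Int :=
  PySem.List.sorted ((PySem.List.pyRange 1 21 1 ++ [25]) ++
    ((PySem.List.pyRange 1 21 1).map (fun i => 2*i) ++ [50]) ++
    (PySem.List.pyRange 1 21 1).map (fun i => 3*i)) (fun x => x) false
def dcB_doubles : List Int := (PySem.List.pyRange 1 21 1).map (fun i => 2*i) ++ [50]

def darts_checkout_alt (limit_value : Int) : Int :=
  dcB_doubles.foldl (fun total dd =>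
    let total := if dd ≤ limit_value then total + 1 else total
    (PySem.List.pyRange 0 (dcB_seq.length : Int) 1).foldl (fun total i =>
      let a := dd + PySem.List.pyGetD dcB_seq i 0
      let total := if a ≤ limit_value then total + 1 else total
      (PySem.List.pyRange 0 (i + 1) 1).foldl (fun total j =>
        if a + PySem.List.pyGetD dcB_seq j 0 ≤ limit_value then total + 1 else total) total) total) 0

-- ===== PRECONDITION & SPEC =====
def Spec_darts_checkout (limit_value : Int) (out : Int) : Prop := out = darts_checkout_alt limit_value
instance (limit_value : Int) (out : Int) : Decidable (Spec_darts_checkout limit_value out) := by unfold Spec_darts_checkout; infer_instance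

-- ===== CLAIM (what is proved, stated in full; the proofs are below) =====
def Claim_equal_darts_checkout : Prop := ∀ (limit_value : Int), Dom_darts_checkout limit_value → Spec_darts_checkout limit_value (darts_checkout limit_value)

-- ===== LEMMAS AND PROOFS =====

-- the exact-hit count of singles: #{i ∈ [0,62) : seq[i] = r}, as a 0/1 sum
def dcCnt1 (r : Int) : Int :=
  ((PySem.List.pyRange 0 62 1).map (fun i => if PySem.List.pyGetD dcA_seq i 0 = r then (1:Int) else 0)).sum
-- the exact-hit count of pairs: #{(i,j) : 0 ≤ j ≤ i < 62, seq[i]+seq[j] = r}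
def dcCnt2 (r : Int) : Int :=
  ((PySem.List.pyRange 0 62 1).map (fun i =>
    ((PySem.List.pyRange 0 (i+1) 1).map (fun j => if PySem.List.pyGetD dcA_seq i 0 + PySem.List.pyGetD dcA_seq j 0 = r then (1:Int) else 0)).sum)).sum
-- contribution of one double dd to checkout c, r = c - dd
def dcF (r : Int) : Int := (if r = 0 then 1 else 0) + dcCnt1 r + dcCnt2 r

-- concrete facts about the sequence, the doubles list and the index dictionary
set_option maxRecDepth 40000 in
lemma dc_mono : ∀ i ∈ PySem.List.pyRange 0 62 1, ∀ j ∈ PySem.List.pyRange 0 62 1,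
    i ≤ j → PySem.List.pyGetD dcA_seq i 0 ≤ PySem.List.pyGetD dcA_seq j 0 := by decide

lemma dc_pos : ∀ j ∈ PySem.List.pyRange 0 62 1, 1 ≤ PySem.List.pyGetD dcA_seq j 0 ∧ PySem.List.pyGetD dcA_seq j 0 ≤ 60 := by decide

lemma dc_len : dcA_seq.length = 62 := by decide

set_option maxRecDepth 40000 in
lemma dc_dict_items : ∀ p ∈ dcA_dict.items,
    0 ≤ p.2 ∧ p.2 ≤ 61 ∧ PySem.List.pyGetD dcA_seq p.2 0 = p.1 ∧
      ∀ i ∈ PySem.List.pyRange (p.2+1) 62 1, PySem.List.pyGetD dcA_seq i 0 ≠ p.1 := by decide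

lemma dc_d_sorted : dcA_d.Pairwise (· ≤ ·) := by decide

lemma dc_d_pos : ∀ dd ∈ dcA_d, 1 ≤ dd := by decide

-- descending ranges
lemma dc_range_neg_cons (k : Nat) :
    PySem.List.pyRange (k : Int) (-1) (-1) = (k : Int) :: PySem.List.pyRange ((k:Int) - 1) (-1) (-1) := by
  simp only [PySem.List.pyRange]
  norm_num
  have h1 : (if (-1:Int) < (k:Int) then k + 1 else 0) = k + 1 := by
    simp [show (-1:Int) < (k:Int) by omega]
  have h2 : (if 0 < k then k else 0) = k := by split <;> omega
  rw [h1, h2, List.range_succ_eq_map]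
  simp only [List.map_cons, List.map_map]
  refine congrArg₂ List.cons (by push_cast; ring) ?_
  refine List.map_congr_left (fun m _ => ?_)
  simp [Function.comp]; ring

lemma dc_range_neg_perm (k : Nat) :
    (PySem.List.pyRange (k : Int) (-1) (-1)).Perm (PySem.List.pyRange 0 ((k:Int)+1) 1) := by
  induction k with
  | zero => decide
  | succ m ih =>
    rw [dc_range_neg_cons]
    have e1 : ((m+1 : Nat) : Int) - 1 = (m : Int) := by push_cast; ring
    have e2 : PySem.List.pyRange 0 (((m+1:Nat):Int)+1) 1 = PySem.List.pyRange 0 ((m:Int)+1) 1 ++ [((m:Nat):Int)+1] := by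
      have : ((m+1:Nat):Int)+1 = ((m:Int)+1)+1 := by push_cast; ring
      rw [this, PySem.List.pyRange_one_succ_right (by omega)]
    rw [e1, e2]
    have : ((m+1:Nat):Int) = ((m:Nat):Int)+1 := by push_cast; ring
    rw [this]
    exact ((ih.cons _).trans (List.perm_append_singleton _ _).symm)

lemma dc_range_neg_mem (k : Nat) : ∀ x ∈ PySem.List.pyRange (k : Int) (-1) (-1), 0 ≤ x ∧ x ≤ (k:Int) := by
  intro x hx
  have := (dc_range_neg_perm k).mem_iff.mp hx
  rw [PySem.List.mem_pyRange_one] at this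
  omega

lemma dc_range_neg_pairwise (k : Nat) : (PySem.List.pyRange (k : Int) (-1) (-1)).Pairwise (· > ·) := by
  induction k with
  | zero => decide
  | succ m ih =>
    rw [dc_range_neg_cons]
    have e1 : ((m+1 : Nat) : Int) - 1 = (m : Int) := by push_cast; ring
    rw [e1]
    refine List.Pairwise.cons (fun x hx => ?_) ih
    have := dc_range_neg_mem m x hx
    push_cast
    omega

-- indicator sums
lemma dc_indicator (v lo b : Int) (h : lo ≤ v) :
    ((PySem.List.pyRange lo b 1).map (fun r => if v = r then (1:Int) else 0)).sum
      = if v < b then 1 else 0 := by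
  have hn := PySem.List.nodup_pyRange_one (a := lo) (b := b)
  have hcount := List.Nodup.count (a := v) hn
  have h1 : ((PySem.List.pyRange lo b 1).map (fun r => if v = r then (1:Int) else 0)).sum
      = ((PySem.List.pyRange lo b 1).countP (fun r => decide (v = r)) : Int) := by
    rw [← PySem.List.sum_map_ite_one_zero (fun r => decide (v = r))]
    simp
  rw [h1]
  have h2 : (PySem.List.pyRange lo b 1).countP (fun r => decide (v = r)) = (PySem.List.pyRange lo b 1).count v := by
    simp [List.count]
    congr 1
    funext r
    simp [eq_comm, BEq.beq]
  rw [h2, hcount]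
  by_cases hv : v < b
  · simp [PySem.List.mem_pyRange_one, h, hv]
  · simp [PySem.List.mem_pyRange_one, hv]

lemma dc_sum_zero {α : Type} (L : List α) (f : α → Int) (h : ∀ x ∈ L, f x = 0) :
    (L.map f).sum = 0 := by
  induction L with
  | nil => rfl
  | cons x t ih => simp [h x (by simp), ih (fun y hy => h y (by simp [hy]))]

lemma dc_sum_swap {α β : Type} (L1 : List α) (L2 : List β) (f : α → β → Int) :
    (L1.map (fun x => (L2.map (f x)).sum)).sum = (L2.map (fun y => (L1.map (fun x => f x y)).sum)).sum := by
  induction L1 with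
  | nil => simp
  | cons x t ih =>
    simp only [List.map_cons, List.sum_cons, ih]
    rw [← PySem.List.sum_map_add_int]

lemma dc_shift (a b t : Int) :
    (PySem.List.pyRange a b 1).map (fun x => x + t) = PySem.List.pyRange (a+t) (b+t) 1 := by
  rw [PySem.List.pyRange_one, PySem.List.pyRange_one, List.map_map]
  have h : b + t - (a + t) = b - a := by ring
  rw [h]
  refine List.map_congr_left (fun k _ => ?_)
  simp [Function.comp]; ring

-- counting fold shapes (indicator-sum versions of the loop bodies of B)
lemma dc_count_fold (q : Int → Prop) [DecidablePred q] (l : List Int) (t : Int) :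
    l.foldl (fun total x => if q x then total + 1 else total) t
      = t + (l.map (fun x => if q x then (1:Int) else 0)).sum := by
  induction l generalizing t with
  | nil => simp
  | cons x rest ih =>
    by_cases h : q x
    · simp [h, ih]; ring
    · simp [h, ih]

lemma dc_fold_sum (q : Int → Prop) [DecidablePred q] (g : Int → Int) (l : List Int) (t : Int) :
    l.foldl (fun total x => (if q x then total + 1 else total) + g x) t
      = t + (l.map (fun x => (if q x then (1:Int) else 0) + g x)).sum := by
  induction l generalizing t with
  | nil => simp
  | cons x rest ih =>
    by_cases h : q x
    · simp [h, ih]; ring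
    · simp [h, ih]; ring

-- loop characterizations of A
lemma dc_pair_loop (res a : Int) (l : List Int) (c : Int)
    (hpw : l.Pairwise (· > ·)) (hb : ∀ j ∈ l, 0 ≤ j ∧ j ≤ 61) :
    dcA_pair res a dcA_seq l c = c + (l.map (fun j => if a + PySem.List.pyGetD dcA_seq j 0 = res then (1:Int) else 0)).sum := by
  induction l generalizing c with
  | nil => simp [dcA_pair]
  | cons j rest ih =>
    obtain ⟨hj, hrest⟩ := List.pairwise_cons.mp hpw
    have hbj := hb j (by simp)
    have hbrest : ∀ x ∈ rest, 0 ≤ x ∧ x ≤ 61 := fun x hx => hb x (by simp [hx])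
    by_cases h1 : a + PySem.List.pyGetD dcA_seq j 0 = res
    · simp only [dcA_pair] at *
      rw [if_pos h1, ih (c+1) hrest hbrest]
      simp [h1]; ring
    · by_cases h2 : a + PySem.List.pyGetD dcA_seq j 0 < res
      · simp only [dcA_pair] at *
        rw [if_neg h1, if_pos h2]
        have hz : (rest.map (fun j => if a + PySem.List.pyGetD dcA_seq j 0 = res then (1:Int) else 0)).sum = 0 := by
          refine dc_sum_zero _ _ (fun x hx => ?_)
          have hxb := hbrest x hx
          have hxj : x < j := hj x hx
          have hmono := dc_mono x (by rw [PySem.List.mem_pyRange_one]; omega)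
            j (by rw [PySem.List.mem_pyRange_one]; omega) (by omega)
          have hlt : ¬ (a + PySem.List.pyGetD dcA_seq x 0 = res) := by omega
          simp [hlt]
        simp only [List.map_cons, List.sum_cons, if_neg h1]
        linarith [hz]
      · simp only [dcA_pair] at *
        rw [if_neg h1, if_neg h2, ih c hrest hbrest]
        simp [h1]

lemma dc_pairsum_zero_of_eq (res : Int) (i : Int) (hi : 0 ≤ i ∧ i ≤ 61) (h : PySem.List.pyGetD dcA_seq i 0 = res) :
    ((PySem.List.pyRange 0 (i+1) 1).map (fun j => if PySem.List.pyGetD dcA_seq i 0 + PySem.List.pyGetD dcA_seq j 0 = res then (1:Int) else 0)).sum = 0 := by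
  refine dc_sum_zero _ _ (fun j hj => ?_)
  rw [PySem.List.mem_pyRange_one] at hj
  have hp := dc_pos j (by rw [PySem.List.mem_pyRange_one]; omega)
  have : ¬ (PySem.List.pyGetD dcA_seq i 0 + PySem.List.pyGetD dcA_seq j 0 = res) := by omega
  simp [this]

lemma dc_idx_loop (res : Int) (l : List Int) (c : Int)
    (hb : ∀ i ∈ l, 0 ≤ i ∧ i ≤ 61) :
    dcA_idx res dcA_seq l c = c + (l.map (fun i =>
      (if PySem.List.pyGetD dcA_seq i 0 = res then (1:Int) else 0) +
      ((PySem.List.pyRange 0 (i+1) 1).map (fun j => if PySem.List.pyGetD dcA_seq i 0 + PySem.List.pyGetD dcA_seq j 0 = res then (1:Int) else 0)).sum)).sum := by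
  induction l generalizing c with
  | nil => simp [dcA_idx]
  | cons i rest ih =>
    have hbi := hb i (by simp)
    have hbrest : ∀ x ∈ rest, 0 ≤ x ∧ x ≤ 61 := fun x hx => hb x (by simp [hx])
    by_cases h : PySem.List.pyGetD dcA_seq i 0 = res
    · simp only [dcA_idx] at *
      rw [if_pos h, ih (c+1) hbrest]
      have hz := dc_pairsum_zero_of_eq res i hbi h
      simp only [List.map_cons, List.sum_cons]
      rw [hz, if_pos h]
      ring
    · simp only [dcA_idx] at *
      rw [if_neg h]
      -- the pair loop over the descending range [i..0]
      have hi0 : i = ((i.toNat : Nat) : Int) := by omega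
      have hpl := dc_pair_loop res (PySem.List.pyGetD dcA_seq i 0) (PySem.List.pyRange i (-1) (-1)) c
        (by rw [hi0]; exact dc_range_neg_pairwise i.toNat)
        (by rw [hi0]; intro x hx; have := dc_range_neg_mem i.toNat x hx; omega)
      rw [hpl]
      have hperm : (PySem.List.pyRange i (-1) (-1)).Perm (PySem.List.pyRange 0 (i+1) 1) := by
        rw [hi0]; exact dc_range_neg_perm i.toNat
      have hsum : ((PySem.List.pyRange i (-1) (-1)).map (fun j => if PySem.List.pyGetD dcA_seq i 0 + PySem.List.pyGetD dcA_seq j 0 = res then (1:Int) else 0)).sum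
          = ((PySem.List.pyRange 0 (i+1) 1).map (fun j => if PySem.List.pyGetD dcA_seq i 0 + PySem.List.pyGetD dcA_seq j 0 = res then (1:Int) else 0)).sum :=
        (hperm.map _).sum_eq
      rw [hsum, ih _ hbrest]
      simp only [List.map_cons, List.sum_cons]
      rw [if_neg h]
      ring

lemma dc_cnt_split (r : Int) :
    dcCnt1 r + dcCnt2 r = ((PySem.List.pyRange 0 62 1).map (fun i =>
      (if PySem.List.pyGetD dcA_seq i 0 = r then (1:Int) else 0) +
      ((PySem.List.pyRange 0 (i+1) 1).map (fun j => if PySem.List.pyGetD dcA_seq i 0 + PySem.List.pyGetD dcA_seq j 0 = r then (1:Int) else 0)).sum)).sum := by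
  rw [dcCnt1, dcCnt2, ← PySem.List.sum_map_add_int]

lemma dcF_nonpos (r : Int) (h : r ≤ 0) : dcF r = if r = 0 then 1 else 0 := by
  have h1 : dcCnt1 r = 0 := by
    refine dc_sum_zero _ _ (fun i hi => ?_)
    have := dc_pos i hi
    have : ¬ (PySem.List.pyGetD dcA_seq i 0 = r) := by omega
    simp [this]
  have h2 : dcCnt2 r = 0 := by
    refine dc_sum_zero _ _ (fun i hi => ?_)
    refine dc_sum_zero _ _ (fun j hj => ?_)
    rw [PySem.List.mem_pyRange_one] at hi hj
    have hpi := dc_pos i (by rw [PySem.List.mem_pyRange_one]; omega)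
    have hpj := dc_pos j (by rw [PySem.List.mem_pyRange_one]; omega)
    have : ¬ (PySem.List.pyGetD dcA_seq i 0 + PySem.List.pyGetD dcA_seq j 0 = r) := by omega
    simp [this]
  rw [dcF, h1, h2]; ring

-- the idx loop over a descending range [k..0] collects all exact hits when nothing above k can hit
lemma dc_row (res : Int) (k : Int) (counter : Int) (hk0 : 0 ≤ k) (hk61 : k ≤ 61)
    (hzero : ∀ i ∈ PySem.List.pyRange (k+1) 62 1,
      (if PySem.List.pyGetD dcA_seq i 0 = res then (1:Int) else 0) +
      ((PySem.List.pyRange 0 (i+1) 1).map (fun j => if PySem.List.pyGetD dcA_seq i 0 + PySem.List.pyGetD dcA_seq j 0 = res then (1:Int) else 0)).sum = 0) :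
    dcA_idx res dcA_seq (PySem.List.pyRange k (-1) (-1)) counter = counter + (dcCnt1 res + dcCnt2 res) := by
  have hk : k = ((k.toNat : Nat) : Int) := by omega
  rw [dc_idx_loop res _ counter
    (by rw [hk]; intro x hx; have := dc_range_neg_mem k.toNat x hx; omega)]
  have hperm : (PySem.List.pyRange k (-1) (-1)).Perm (PySem.List.pyRange 0 (k+1) 1) := by
    rw [hk]; exact dc_range_neg_perm k.toNat
  rw [((hperm.map _).sum_eq : _)]
  rw [dc_cnt_split]
  have hsplit : PySem.List.pyRange 0 62 1 = PySem.List.pyRange 0 (k+1) 1 ++ PySem.List.pyRange (k+1) 62 1 :=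
    PySem.List.pyRange_one_append 0 (k+1) 62 (by omega) (by omega)
  rw [hsplit, List.map_append, List.sum_append]
  rw [dc_sum_zero _ _ hzero]
  ring

lemma dc_row_full (res : Int) (counter : Int) :
    dcA_idx res dcA_seq (PySem.List.pyRange 61 (-1) (-1)) counter = counter + (dcCnt1 res + dcCnt2 res) := by
  refine dc_row res 61 counter (by omega) (by omega) (fun i hi => ?_)
  rw [PySem.List.mem_pyRange_one] at hi
  omega

lemma dc_row_dict (res k : Int) (hget : dcA_dict.get? res = some k) (counter : Int) :
    dcA_idx res dcA_seq (PySem.List.pyRange k (-1) (-1)) counter = counter + (dcCnt1 res + dcCnt2 res) := by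
  have hmem := PySem.Dict.mem_items_of_get?_eq_some dcA_dict hget
  obtain ⟨hk0, hk61, hSk, hnores⟩ := dc_dict_items (res, k) hmem
  have hSk' : PySem.List.pyGetD dcA_seq k 0 = res := hSk
  have hk0' : (0:Int) ≤ k := hk0
  have hk61' : k ≤ (61:Int) := hk61
  refine dc_row res k counter hk0' hk61' (fun i hi => ?_)
  have hi' := PySem.List.mem_pyRange_one.mp hi
  have hne : PySem.List.pyGetD dcA_seq i 0 ≠ res := hnores i hi
  have hgt : PySem.List.pyGetD dcA_seq i 0 > res := by
    have := dc_mono k (by rw [PySem.List.mem_pyRange_one]; omega)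
      i (by rw [PySem.List.mem_pyRange_one]; omega) (by omega)
    omega
  have hz2 : ((PySem.List.pyRange 0 (i+1) 1).map (fun j => if PySem.List.pyGetD dcA_seq i 0 + PySem.List.pyGetD dcA_seq j 0 = res then (1:Int) else 0)).sum = 0 := by
    refine dc_sum_zero _ _ (fun j hj => ?_)
    rw [PySem.List.mem_pyRange_one] at hj
    have := dc_pos j (by rw [PySem.List.mem_pyRange_one]; omega)
    have : ¬ (PySem.List.pyGetD dcA_seq i 0 + PySem.List.pyGetD dcA_seq j 0 = res) := by omega
    simp [this]
  rw [hz2]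
  simp [hne]

lemma dc_while_top (res : Int) (h60 : res ≤ 60) :
    dcA_while res dcA_seq (dcA_seq.length - 1) = 61 := by
  have hl : dcA_seq.length - 1 = 61 := by rw [dc_len]
  rw [hl]
  have hstep : dcA_while res dcA_seq 61
      = if res > PySem.List.pyGetD dcA_seq ((61:Nat) : Int) 0 then dcA_while res dcA_seq 60
        else ((61:Nat) : Int) := rfl
  have hv : PySem.List.pyGetD dcA_seq ((61:Nat) : Int) 0 = 60 := by decide
  rw [hstep, hv, if_neg (by omega)]
  norm_num

lemma dcF_pos_val (r : Int) (h : ¬ r = 0) : dcF r = dcCnt1 r + dcCnt2 r := by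
  rw [dcF, if_neg h]; ring

lemma dc_doubles_loop (c : Int) (l : List Int) (counter : Int)
    (hpw : l.Pairwise (· ≤ ·)) (hpos : ∀ dd ∈ l, 1 ≤ dd) :
    dcA_doubles c dcA_seq dcA_dict l counter = counter + (l.map (fun dd => dcF (c - dd))).sum := by
  induction l generalizing counter with
  | nil => simp [dcA_doubles]
  | cons dd rest ih =>
    obtain ⟨hdd, hrest⟩ := List.pairwise_cons.mp hpw
    have hposd := hpos dd (by simp)
    have hposrest : ∀ x ∈ rest, 1 ≤ x := fun x hx => hpos x (by simp [hx])
    simp only [List.map_cons, List.sum_cons]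
    by_cases hbrk : dd > c
    · -- break: every remaining contribution is 0
      simp only [dcA_doubles]
      rw [if_pos hbrk]
      have hz : (rest.map (fun dd => dcF (c - dd))).sum = 0 := by
        refine dc_sum_zero _ _ (fun x hx => ?_)
        have hxge := hdd x hx
        rw [dcF_nonpos _ (by omega)]
        simp [show ¬ (c - x = 0) by omega]
      have hh : dcF (c - dd) = 0 := by
        rw [dcF_nonpos _ (by omega)]
        simp [show ¬ (c - dd = 0) by omega]
      rw [hz, hh]
      ring
    · simp only [dcA_doubles]
      rw [if_neg hbrk]
      by_cases hres : c - dd = 0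
      · rw [if_pos hres, ih (counter + 1) hrest hposrest]
        have hh : dcF (c - dd) = 1 := by rw [dcF_nonpos _ (by omega)]; simp [hres]
        rw [hh]
        ring
      · rw [if_neg hres]
        have hh := dcF_pos_val (c - dd) hres
        by_cases h60 : c - dd ≤ 60
        · rw [if_pos h60]
          cases hget : dcA_dict.get? (c - dd) with
          | some k =>
            rw [dc_row_dict (c - dd) k hget counter, ih _ hrest hposrest, hh]
            ring
          | none =>
            rw [dc_while_top (c - dd) h60, dc_row_full (c - dd) counter, ih _ hrest hposrest, hh]
            ring
        · rw [if_neg h60]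
          have hl : ((dcA_seq.length : Nat) : Int) - 1 = 61 := by rw [dc_len]; norm_num
          rw [hl, dc_row_full (c - dd) counter, ih _ hrest hposrest, hh]
          ring

lemma dc_per_double (dd n : Int) (hdd : 1 ≤ dd) :
    ((PySem.List.pyRange 1 (n+1) 1).map (fun c => dcF (c - dd))).sum
      = (if dd ≤ n then 1 else 0) +
        ((PySem.List.pyRange 0 62 1).map (fun i =>
          (if dd + PySem.List.pyGetD dcA_seq i 0 ≤ n then (1:Int) else 0) +
          ((PySem.List.pyRange 0 (i+1) 1).map (fun j =>
            if dd + PySem.List.pyGetD dcA_seq i 0 + PySem.List.pyGetD dcA_seq j 0 ≤ n then (1:Int) else 0)).sum)).sum := by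
  -- reindex: c ↦ r = c - dd
  have hre : ((PySem.List.pyRange 1 (n+1) 1).map (fun c => dcF (c - dd))).sum
      = ((PySem.List.pyRange (1-dd) (n+1-dd) 1).map (fun r => dcF r)).sum := by
    have e1 : (1:ℤ) - dd = 1 + -dd := by ring
    have e2 : n + 1 - dd = n + 1 + -dd := by ring
    rw [e1, e2, ← dc_shift 1 (n+1) (-dd), List.map_map]
    refine congrArg List.sum (List.map_congr_left (fun c _ => ?_))
    simp only [Function.comp]
    rw [sub_eq_add_neg]
  rw [hre]
  -- split dcF into its three summands
  have hsplit : ((PySem.List.pyRange (1-dd) (n+1-dd) 1).map (fun r => dcF r)).sum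
      = ((PySem.List.pyRange (1-dd) (n+1-dd) 1).map (fun r => if r = 0 then (1:Int) else 0)).sum
      + ((PySem.List.pyRange (1-dd) (n+1-dd) 1).map dcCnt1).sum
      + ((PySem.List.pyRange (1-dd) (n+1-dd) 1).map dcCnt2).sum := by
    simp only [dcF]
    rw [show (fun r => (if r = 0 then (1:Int) else 0) + dcCnt1 r + dcCnt2 r)
          = (fun r => ((if r = 0 then (1:Int) else 0) + dcCnt1 r) + dcCnt2 r) from rfl]
    rw [PySem.List.sum_map_add_int, PySem.List.sum_map_add_int]
  rw [hsplit]
  -- term 1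
  have t1 : ((PySem.List.pyRange (1-dd) (n+1-dd) 1).map (fun r => if r = 0 then (1:Int) else 0)).sum
      = if dd ≤ n then 1 else 0 := by
    have h0 := dc_indicator 0 (1-dd) (n+1-dd) (by omega)
    refine Eq.trans (congrArg List.sum (List.map_congr_left (fun r _ => ?_))) (h0.trans ?_)
    · exact if_congr ⟨fun h => h.symm, fun h => h.symm⟩ rfl rfl
    · exact if_congr (by omega) rfl rfl
  rw [t1]
  -- term 2
  have t2 : ((PySem.List.pyRange (1-dd) (n+1-dd) 1).map dcCnt1).sum
      = ((PySem.List.pyRange 0 62 1).map (fun i => if dd + PySem.List.pyGetD dcA_seq i 0 ≤ n then (1:Int) else 0)).sum := by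
    unfold dcCnt1
    rw [dc_sum_swap]
    refine congrArg List.sum (List.map_congr_left (fun i hi => ?_))
    have hp := dc_pos i hi
    rw [dc_indicator (PySem.List.pyGetD dcA_seq i 0) (1-dd) (n+1-dd) (by omega)]
    congr 1
    simp only [eq_iff_iff]
    omega
  rw [t2]
  -- term 3
  have t3 : ((PySem.List.pyRange (1-dd) (n+1-dd) 1).map dcCnt2).sum
      = ((PySem.List.pyRange 0 62 1).map (fun i =>
          ((PySem.List.pyRange 0 (i+1) 1).map (fun j =>
            if dd + PySem.List.pyGetD dcA_seq i 0 + PySem.List.pyGetD dcA_seq j 0 ≤ n then (1:Int) else 0)).sum)).sum := by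
    unfold dcCnt2
    rw [dc_sum_swap]
    refine congrArg List.sum (List.map_congr_left (fun i hi => ?_))
    rw [dc_sum_swap]
    refine congrArg List.sum (List.map_congr_left (fun j hj => ?_))
    have hpi := dc_pos i hi
    rw [PySem.List.mem_pyRange_one] at hi hj
    have hpj := dc_pos j (by rw [PySem.List.mem_pyRange_one]; omega)
    rw [dc_indicator (PySem.List.pyGetD dcA_seq i 0 + PySem.List.pyGetD dcA_seq j 0) (1-dd) (n+1-dd) (by omega)]
    congr 1
    simp only [eq_iff_iff]
    omega
  rw [t3, add_assoc, ← PySem.List.sum_map_add_int]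

lemma dcA_eq (n : Int) :
    darts_checkout n = ((PySem.List.pyRange 1 (n+1) 1).map (fun c => (dcA_d.map (fun dd => dcF (c - dd))).sum)).sum := by
  rw [darts_checkout]
  rw [PySem.List.foldl_add _ (fun c => checkout_solutions c dcA_seq dcA_dict dcA_d)]
  rw [zero_add]
  refine congrArg List.sum (List.map_congr_left (fun c _ => ?_))
  rw [checkout_solutions, dc_doubles_loop c dcA_d 0 dc_d_sorted dc_d_pos, zero_add]

lemma dcB_eq (n : Int) :
    darts_checkout_alt n = (dcA_d.map (fun dd =>
      (if dd ≤ n then (1:Int) else 0) +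
      ((PySem.List.pyRange 0 62 1).map (fun i =>
        (if dd + PySem.List.pyGetD dcA_seq i 0 ≤ n then (1:Int) else 0) +
        ((PySem.List.pyRange 0 (i+1) 1).map (fun j =>
          if dd + PySem.List.pyGetD dcA_seq i 0 + PySem.List.pyGetD dcA_seq j 0 ≤ n then (1:Int) else 0)).sum)).sum)).sum := by
  rw [darts_checkout_alt]
  have hlen : ((dcB_seq.length : Nat) : Int) = 62 := by decide
  have hBD : dcB_doubles = dcA_d := rfl
  have hBS : dcB_seq = dcA_seq := rfl
  rw [hlen, hBD]
  have hmid : ∀ (dd total : Int),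
      (PySem.List.pyRange 0 62 1).foldl (fun total i =>
        (PySem.List.pyRange 0 (i + 1) 1).foldl (fun total j =>
          if dd + PySem.List.pyGetD dcB_seq i 0 + PySem.List.pyGetD dcB_seq j 0 ≤ n then total + 1 else total)
          (if dd + PySem.List.pyGetD dcB_seq i 0 ≤ n then total + 1 else total)) total
      = total + ((PySem.List.pyRange 0 62 1).map (fun i =>
          (if dd + PySem.List.pyGetD dcA_seq i 0 ≤ n then (1:Int) else 0) +
          ((PySem.List.pyRange 0 (i+1) 1).map (fun j =>
            if dd + PySem.List.pyGetD dcA_seq i 0 + PySem.List.pyGetD dcA_seq j 0 ≤ n then (1:Int) else 0)).sum)).sum := by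
    intro dd total
    have hinner : ∀ i t, (PySem.List.pyRange 0 (i + 1) 1).foldl (fun total j =>
        if dd + PySem.List.pyGetD dcB_seq i 0 + PySem.List.pyGetD dcB_seq j 0 ≤ n then total + 1 else total) t
        = t + ((PySem.List.pyRange 0 (i+1) 1).map (fun j =>
            if dd + PySem.List.pyGetD dcA_seq i 0 + PySem.List.pyGetD dcA_seq j 0 ≤ n then (1:Int) else 0)).sum := by
      intro i t
      rw [dc_count_fold (fun j => dd + PySem.List.pyGetD dcB_seq i 0 + PySem.List.pyGetD dcB_seq j 0 ≤ n)]
      rfl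
    rw [PySem.List.foldl_congr_mem _ _ (fun total i =>
        (if dd + PySem.List.pyGetD dcA_seq i 0 ≤ n then total + 1 else total) +
        ((PySem.List.pyRange 0 (i+1) 1).map (fun j =>
          if dd + PySem.List.pyGetD dcA_seq i 0 + PySem.List.pyGetD dcA_seq j 0 ≤ n then (1:Int) else 0)).sum) _
        (fun t i _ => by rw [hinner i]; rfl)]
    rw [dc_fold_sum (fun i => dd + PySem.List.pyGetD dcA_seq i 0 ≤ n)]
  rw [PySem.List.foldl_congr_mem _ _ (fun total dd =>
      (if dd ≤ n then total + 1 else total) +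
      ((PySem.List.pyRange 0 62 1).map (fun i =>
        (if dd + PySem.List.pyGetD dcA_seq i 0 ≤ n then (1:Int) else 0) +
        ((PySem.List.pyRange 0 (i+1) 1).map (fun j =>
          if dd + PySem.List.pyGetD dcA_seq i 0 + PySem.List.pyGetD dcA_seq j 0 ≤ n then (1:Int) else 0)).sum)).sum) _
      (fun t dd _ => by rw [hmid dd])]
  rw [dc_fold_sum (fun dd => dd ≤ n)]
  rw [zero_add]

-- ===== VERDICT (by name: the statement is the Claim_ definition above) =====
theorem darts_checkout_spec : Claim_equal_darts_checkout := by
  intro n _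
  show darts_checkout n = darts_checkout_alt n
  rw [dcA_eq, dcB_eq, dc_sum_swap]
  refine congrArg List.sum (List.map_congr_left ?_)
  intro dd hdd
  exact dc_per_double dd n (dc_d_pos dd hdd)
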